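-- pv_equiv track=rewrite | github.com/andrewgait/advent_of_code | adventofcode2019/advent13/advent13.py | get_ball_paddle_x
-- ===== SOURCE A (Python) =====
-- def get_ball_paddle_x(grid):
--     ball_x = 0
--     paddle_x = 0
--     for j in range(len(grid)):
--         for i in range(len(grid[j])):
--             if (grid[j][i] == 3):
--                 paddle_x = i
--             if (grid[j][i] == 4):
--                 ball_x = i
--
--     return ball_x, paddle_x
-- ===== SOURCE B (Python) =====
-- def get_ball_paddle_x(grid):
--     def last_col(target):
--         for row in reversed(grid):
--             for i in range(len(row) - 1, -1, -1):
--                 if row[i] == target: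
--                     return i
--         return 0
--     return last_col(4), last_col(3)
-- ===== Notes on version B (the rewrite author's own statement) =====
-- stated objective: simpler
-- what changed: Replaces the single forward pass tracking both coordinates with two independent reverse (last-row/last-column first) searches that early-return at the first match, which is exactly A's last overwrite.
import Mathlib
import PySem

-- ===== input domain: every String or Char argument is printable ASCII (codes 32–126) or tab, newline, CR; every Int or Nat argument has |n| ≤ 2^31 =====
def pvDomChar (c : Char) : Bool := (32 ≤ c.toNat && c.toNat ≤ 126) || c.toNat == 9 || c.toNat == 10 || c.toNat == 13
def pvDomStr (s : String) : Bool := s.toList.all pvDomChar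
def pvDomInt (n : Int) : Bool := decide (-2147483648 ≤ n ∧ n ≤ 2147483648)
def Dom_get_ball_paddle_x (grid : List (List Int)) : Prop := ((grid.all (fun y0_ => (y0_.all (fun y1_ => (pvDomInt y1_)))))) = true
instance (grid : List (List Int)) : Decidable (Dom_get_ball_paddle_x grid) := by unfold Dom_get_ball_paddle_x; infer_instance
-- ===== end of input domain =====

-- ===== PORT A =====
-- B replaces A's single forward pass with two independent reverse searches (decomposition change); same cost.
def get_ball_paddle_x (grid : List (List Int)) : Int × Int :=
  grid.foldl (fun st row =>
    row.zipIdx.foldl (fun (st : Int × Int) p =>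
      let st := if p.1 == 3 then (st.1, (p.2 : Int)) else st
      if p.1 == 4 then ((p.2 : Int), st.2) else st) st) (0, 0)

-- ===== PORT B =====
-- reverse scan of one row, indices len-1 .. 0: tail is examined first (later columns first)
def lastIdxInRow (t : Int) : List Int → Nat → Option Nat
  | [], _ => none
  | x :: xs, i =>
    match lastIdxInRow t xs (i + 1) with
    | some j => some j
    | none => if x == t then some i else none

-- rows examined from the last upwards
def lastColAux (t : Int) : List (List Int) → Option Nat
  | [] => none
  | r :: rs =>
    match lastColAux t rs with
    | some j => some j
    | none => lastIdxInRow t r 0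

def last_col (grid : List (List Int)) (t : Int) : Int :=
  match lastColAux t grid with
  | some j => (j : Int)
  | none => 0

def get_ball_paddle_x_alt (grid : List (List Int)) : Int × Int :=
  (last_col grid 4, last_col grid 3)

-- ===== PRECONDITION & SPEC =====
def Spec_get_ball_paddle_x (grid : List (List Int)) (out : Int × Int) : Prop := out = get_ball_paddle_x_alt grid
instance (grid : List (List Int)) (out : Int × Int) : Decidable (Spec_get_ball_paddle_x grid out) := by unfold Spec_get_ball_paddle_x; infer_instance

-- ===== CLAIM (what is proved, stated in full; the proofs are below) =====
def Claim_equal_get_ball_paddle_x : Prop := ∀ (grid : List (List Int)), Dom_get_ball_paddle_x grid → Spec_get_ball_paddle_x grid (get_ball_paddle_x grid)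

-- ===== LEMMAS AND PROOFS =====
def optD (o : Option Nat) (d : Int) : Int :=
  match o with
  | some j => (j : Int)
  | none => d

theorem row_foldl_eq (row : List Int) : ∀ (n : Nat) (b p : Int),
    (row.zipIdx n).foldl (fun (st : Int × Int) q =>
      let st := if q.1 == 3 then (st.1, (q.2 : Int)) else st
      if q.1 == 4 then ((q.2 : Int), st.2) else st) (b, p)
    = (optD (lastIdxInRow 4 row n) b, optD (lastIdxInRow 3 row n) p) := by
  induction row with
  | nil => intro n b p; simp [lastIdxInRow, optD]
  | cons x xs ih =>
    intro n b p
    simp only [List.zipIdx_cons, List.foldl_cons]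
    rw [show ((let st := if x == 3 then ((b, p).1, (n : Int)) else (b, p);
        if x == 4 then ((n : Int), st.2) else st) : Int × Int)
      = ((if x == 4 then (n : Int) else b), (if x == 3 then (n : Int) else p)) by
        by_cases h3 : x == 3 <;> by_cases h4 : x == 4 <;> simp_all]
    rw [ih]
    simp only [lastIdxInRow, Prod.mk.injEq]
    constructor
    · cases h : lastIdxInRow 4 xs (n + 1) <;> by_cases h4 : x == 4 <;> simp [optD, h4]
    · cases h : lastIdxInRow 3 xs (n + 1) <;> by_cases h3 : x == 3 <;> simp [optD, h3]

theorem grid_foldl_eq (grid : List (List Int)) : ∀ (b p : Int),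
    grid.foldl (fun st row =>
      row.zipIdx.foldl (fun (st : Int × Int) q =>
        let st := if q.1 == 3 then (st.1, (q.2 : Int)) else st
        if q.1 == 4 then ((q.2 : Int), st.2) else st) st) (b, p)
    = (optD (lastColAux 4 grid) b, optD (lastColAux 3 grid) p) := by
  induction grid with
  | nil => intro b p; simp [lastColAux, optD]
  | cons r rs ih =>
    intro b p
    simp only [List.foldl_cons]
    rw [row_foldl_eq, ih]
    simp only [lastColAux, Prod.mk.injEq]
    constructor
    · cases h : lastColAux 4 rs <;> cases h2 : lastIdxInRow 4 r 0 <;> simp [optD]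
    · cases h : lastColAux 3 rs <;> cases h2 : lastIdxInRow 3 r 0 <;> simp [optD]

-- ===== VERDICT (by name: the statement is the Claim_ definition above) =====
theorem get_ball_paddle_x_spec : Claim_equal_get_ball_paddle_x := by
  intro grid _
  show get_ball_paddle_x grid = get_ball_paddle_x_alt grid
  unfold get_ball_paddle_x get_ball_paddle_x_alt last_col
  rw [grid_foldl_eq]
  cases h4 : lastColAux 4 grid <;> cases h3 : lastColAux 3 grid <;> simp [optD]
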